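-- pv_equiv track=rewrite | github.com/stepenta/RI | mplane/tstat_proxy.py | split_specs
-- ===== SOURCE A (Python) =====
-- def split_specs(msg):
--     specs = []
--     spec_start = 0
--     spec_end = msg.find('}', spec_start)
--     while spec_end != -1:
--         specs.append(msg[spec_start:spec_end+1])
--         spec_start = spec_end + 1
--         spec_end = msg.find('}', spec_start)
--     return specs
-- ===== SOURCE B (Python) =====
-- def split_specs(msg):
--     return [p + '}' for p in msg.split('}')[:-1]]
-- ===== Notes on version B (the rewrite author's own statement) =====
-- stated objective: simpler
-- what changed: Replaces the incremental find-and-slice loop with one whole-string split at the closing-brace delimiter followed by re-appending the delimiter to every fragment except the trailing remainder.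
import Mathlib
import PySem

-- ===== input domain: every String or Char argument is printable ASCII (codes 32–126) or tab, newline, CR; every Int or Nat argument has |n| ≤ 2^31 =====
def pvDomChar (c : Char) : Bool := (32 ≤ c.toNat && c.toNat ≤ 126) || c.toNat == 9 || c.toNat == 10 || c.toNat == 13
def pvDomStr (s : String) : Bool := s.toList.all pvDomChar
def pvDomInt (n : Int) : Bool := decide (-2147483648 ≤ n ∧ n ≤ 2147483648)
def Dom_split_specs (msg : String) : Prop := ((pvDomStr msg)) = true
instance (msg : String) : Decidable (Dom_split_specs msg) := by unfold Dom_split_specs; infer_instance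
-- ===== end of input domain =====

-- B replaces A's incremental find-and-slice loop by one whole-string split plus a map; objective: simpler.

-- ===== PORT A =====
-- the fuel (msg.length + 1) only makes the while-loop total: each iteration moves
-- spec_start strictly forward, so the loop runs at most msg.length times.
def splitSpecsLoop (msg : String) : Nat → List String → Int → List String
  | 0, specs, _ => specs
  | fuel + 1, specs, spec_start =>
      let spec_end := PySem.Str.findFrom msg "}" spec_start
      if spec_end = -1 then specs
      else splitSpecsLoop msg fuel
        (specs ++ [PySem.Str.slice msg (some spec_start) (some (spec_end + 1))])
        (spec_end + 1)

def split_specs (msg : String) : List String :=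
  splitSpecsLoop msg (msg.toList.length + 1) [] 0

-- ===== PORT B =====
def split_specs_alt (msg : String) : List String :=
  ((PySem.Str.split? msg "}").getD []  -- msg.split('}'); some: sep ≠ ''
    |> fun parts => (PySem.List.slice parts none (some (-1))).map (fun p => p ++ "}"))

-- ===== PRECONDITION & SPEC =====
def Spec_split_specs (msg : String) (out : List String) : Prop := out = split_specs_alt msg
instance (msg : String) (out : List String) : Decidable (Spec_split_specs msg out) := by unfold Spec_split_specs; infer_instance

-- ===== CLAIM (what is proved, stated in full; the proofs are below) =====
def Claim_equal_split_specs : Prop := ∀ (msg : String), Dom_split_specs msg → Spec_split_specs msg (split_specs msg)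

-- ===== LEMMAS AND PROOFS =====

-- structural model of splitting on '}' (proof helper only)
def pvSplit : List Char → List (List Char)
  | [] => [[]]
  | c :: rest =>
      if c = '}' then [] :: pvSplit rest
      else match pvSplit rest with
        | [] => [[c]]
        | p :: ps => (c :: p) :: ps

theorem pvSplit_ne_nil (l : List Char) : pvSplit l ≠ [] := by
  cases l with
  | nil => simp [pvSplit]
  | cons c rest =>
    simp only [pvSplit]
    split_ifs
    · simp
    · cases h : pvSplit rest <;> simp

theorem pvSplit_no_sep (l : List Char) (h : '}' ∉ l) : pvSplit l = [l] := by
  induction l with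
  | nil => rfl
  | cons c rest ih =>
    simp only [List.mem_cons, not_or] at h
    have hc : ¬ c = '}' := fun hh => h.1 hh.symm
    simp [pvSplit, hc, ih h.2]

theorem pvSplit_append (a t : List Char) (h : '}' ∉ a) :
    pvSplit (a ++ '}' :: t) = a :: pvSplit t := by
  induction a with
  | nil => simp [pvSplit]
  | cons c rest ih =>
    simp only [List.mem_cons, not_or] at h
    have hc : ¬ c = '}' := fun hh => h.1 hh.symm
    have hne := pvSplit_ne_nil (rest ++ '}' :: t)
    simp [pvSplit, hc, ih h.2]

theorem splitOn_go_spec (fuel : Nat) (l cur : List Char) (acc : List (List Char))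
    (hf : l.length < fuel) :
    PySem.Chars.splitOn.go ['}'] fuel l cur acc =
      acc.reverse ++ (match pvSplit l with
        | [] => []
        | p :: ps => (cur.reverse ++ p) :: ps) := by
  induction fuel generalizing l cur acc with
  | zero => omega
  | succ f ih =>
    cases l with
    | nil => simp [PySem.Chars.splitOn.go, pvSplit]
    | cons c rest =>
      by_cases hc : c = '}'
      · subst hc
        have hpre : List.isPrefixOf ['}'] ('}' :: rest) = true := by
          simp [List.isPrefixOf]
        rw [PySem.Chars.splitOn.go]
        simp only [hpre, if_true, List.length_cons, List.length_nil, Nat.zero_add,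
          List.drop_succ_cons, List.drop_zero] at *
        rw [ih rest [] (cur.reverse :: acc) (by omega)]
        cases h : pvSplit rest with
        | nil => exact absurd h (pvSplit_ne_nil rest)
        | cons p ps => simp [pvSplit, h]
      · have hc' : ¬ ('}' = c) := fun hh => hc hh.symm
        have hpre : List.isPrefixOf ['}'] (c :: rest) = false := by
          simp [List.isPrefixOf, hc']
        rw [PySem.Chars.splitOn.go]
        simp only [hpre, Bool.false_eq_true, if_false]
        rw [ih rest (c :: cur) acc (by simpa using Nat.lt_of_succ_lt_succ hf)]
        cases h : pvSplit rest with
        | nil => exact absurd h (pvSplit_ne_nil rest)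
        | cons p ps => simp [pvSplit, hc, h]

theorem splitOn_eq_pvSplit (l : List Char) :
    PySem.Chars.splitOn l ['}'] = pvSplit l := by
  rw [PySem.Chars.splitOn, splitOn_go_spec (l.length + 1) l [] [] (by omega)]
  cases h : pvSplit l with
  | nil => exact absurd h (pvSplit_ne_nil l)
  | cons p ps => simp

theorem singleton_infix_iff (c : Char) (l : List Char) : [c] <:+: l ↔ c ∈ l := by
  constructor
  · rintro ⟨s, t, rfl⟩; simp
  · intro h
    obtain ⟨s, t, rfl⟩ := List.append_of_mem h
    exact ⟨s, t, by simp⟩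

-- A's loop, characterised over the remaining suffix
theorem loop_spec (msg : String) (fuel start : Nat) (specs : List String)
    (hs : start ≤ msg.toList.length) (hf : msg.toList.length + 1 - start ≤ fuel) :
    splitSpecsLoop msg fuel specs (start : Int) =
      specs ++ ((pvSplit (msg.toList.drop start)).dropLast.map
        (fun p => String.ofList (p ++ ['}']))) := by
  induction fuel generalizing start specs with
  | zero => omega
  | succ f ih =>
    set t := msg.toList.drop start with ht
    have hlen : t.length = msg.toList.length - start := by simp [ht]
    rw [splitSpecsLoop]
    have hff : PySem.Str.findFrom msg "}" (start : Int) =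
        PySem.Chars.findFrom msg.toList ['}'] (start : Int) := by
      simp [PySem.Str.findFrom_eq]
    by_cases hfind : PySem.Chars.find t ['}'] = -1
    · -- no further '}': loop stops; pvSplit t is a singleton, dropLast = []
      have he : PySem.Str.findFrom msg "}" (start : Int) = -1 := by
        rw [hff, PySem.Chars.findFrom_natCast msg.toList ['}'] start hs, ← ht, hfind]
        simp
      have hnotin : '}' ∉ t := by
        have := (PySem.Chars.find_eq_neg_one_iff t ['}']).mp hfind
        exact fun hm => this ((singleton_infix_iff '}' t).mpr hm)
      rw [he]
      simp [pvSplit_no_sep t hnotin]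
    · -- a '}' at relative position j
      have hnn : 0 ≤ PySem.Chars.find t ['}'] := by
        have := PySem.Chars.neg_one_le_find t ['}']
        omega
      set j : Nat := (PySem.Chars.find t ['}']).toNat with hj
      have hjval : PySem.Chars.find t ['}'] = (j : Int) := by
        simp [hj, Int.toNat_of_nonneg hnn]
      have hspec := PySem.Chars.find_spec (s := t) (sub := ['}']) hnn
      have hpref : ['}'] <+: t.drop j := hspec.1
      have hmin : ∀ i < j, ¬ ['}'] <+: t.drop i := hspec.2
      have hjt : j < t.length := by
        by_contra hge
        have : t.drop j = [] := List.drop_eq_nil_of_le (by omega)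
        rw [this] at hpref
        simp at hpref
      -- head of t.drop j is '}'
      have hdrop : t.drop j = '}' :: t.drop (j + 1) := by
        obtain ⟨s, hsuf⟩ := hpref
        have hs' : s = t.drop (j + 1) := by
          have h1 := congrArg List.tail hsuf
          simpa [List.tail_drop] using h1
        rw [← hsuf, hs']
        rfl
      have hnotin : '}' ∉ t.take j := by
        intro hm
        obtain ⟨i, hi, hci⟩ := List.mem_iff_getElem.mp hm
        have hi' : i < j := by
          simp [List.length_take] at hi
          exact hi.1
        apply hmin i hi'
        have hdt : t.drop i = ('}' : Char) :: t.drop (i + 1) := by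
          rw [List.drop_eq_getElem_cons (by omega)]
          congr 1
          rw [← hci]
          simp [List.getElem_take]
        rw [hdt]
        simp
      have he : PySem.Str.findFrom msg "}" (start : Int) = ((start + j : Nat) : Int) := by
        rw [hff, PySem.Chars.findFrom_natCast msg.toList ['}'] start hs, ← ht, hjval]
        have hne : ¬ ((j : Int) = -1) := by omega
        simp only [hne, if_false]
        omega
      have hene : PySem.Str.findFrom msg "}" (start : Int) ≠ -1 := by
        rw [he]; omega
      rw [if_neg hene, he]
      have hcast : ((start + j : Nat) : Int) + 1 = ((start + j + 1 : Nat) : Int) := by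
        push_cast; ring
      have hslice : PySem.Str.slice msg (some (start : Int)) (some (((start + j : Nat) : Int) + 1)) =
          String.ofList (t.take (j + 1)) := by
        apply String.ext
        rw [PySem.Str.toList_slice]
        simp only [PySem.Chars.slice_eq_listSlice, String.toList_ofList]
        rw [hcast, PySem.List.slice_natCast, ← ht]
        rw [show start + j + 1 - start = j + 1 from by omega]
      have hb1 : start + j + 1 ≤ msg.toList.length := by omega
      have hb2 : msg.toList.length + 1 - (start + j + 1) ≤ f := by omega
      have hih := ih (start + j + 1)
        (specs ++ [String.ofList (t.take (j + 1))]) hb1 hb2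
      rw [hslice, hcast, hih]
      have ht' : msg.toList.drop (start + j + 1) = t.drop (j + 1) := by
        simp only [ht, List.drop_drop, Nat.add_comm, Nat.add_left_comm]
      rw [ht']
      -- decompose pvSplit t
      have htdecomp : t = t.take j ++ '}' :: t.drop (j + 1) := by
        rw [← hdrop]; simp
      have hps : pvSplit t = t.take j :: pvSplit (t.drop (j + 1)) := by
        conv_lhs => rw [htdecomp]
        exact pvSplit_append _ _ hnotin
      rw [hps]
      have hne := pvSplit_ne_nil (t.drop (j + 1))
      rw [List.dropLast_cons_of_ne_nil hne]
      have hal : (t.take j).length = j := by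
        simp [List.length_take]
        omega
      have htake : t.take (j + 1) = t.take j ++ ['}'] := by
        conv_lhs => rw [htdecomp]
        rw [show j + 1 = (t.take j).length + 1 from by omega]
        rw [List.take_append]
        simp
      simp [htake]

theorem split_specs_eq (msg : String) :
    split_specs msg = (pvSplit msg.toList).dropLast.map (fun p => String.ofList (p ++ ['}'])) := by
  rw [split_specs]
  have h0 : (0 : Int) = ((0 : Nat) : Int) := rfl
  rw [h0, loop_spec msg (msg.toList.length + 1) 0 [] (by omega) (by omega)]
  simp

theorem split_specs_alt_eq (msg : String) :
    split_specs_alt msg = (pvSplit msg.toList).dropLast.map (fun p => String.ofList (p ++ ['}'])) := by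
  rw [split_specs_alt]
  simp only [PySem.Str.split?.eq_1, show ("}" : String).toList = ['}'] from rfl,
    PySem.Chars.split?.eq_1]
  simp only [List.isEmpty_cons, Bool.false_eq_true, if_false, splitOn_eq_pvSplit]
  simp only [Option.map_some, Option.getD_some]
  rw [PySem.List.slice_to_neg_one, ← List.map_dropLast, List.map_map]
  apply List.map_congr_left
  intro p _
  simp

-- ===== VERDICT (by name: the statement is the Claim_ definition above) =====
theorem split_specs_spec : Claim_equal_split_specs := by
  intro msg _
  unfold Spec_split_specs
  rw [split_specs_eq, split_specs_alt_eq]
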